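-- pv_equiv track=rewrite | github.com/dreamlx/codeindex | src/codeindex/parsers/java/symbols.py | _extract_package_namespace
-- ===== SOURCE A (Python) =====
-- def _extract_package_namespace(class_full_name: str) -> str:
--     """Extract package namespace from a full class name."""
--     if not class_full_name or "." not in class_full_name:
--         return ""
--
--     parts = class_full_name.split(".")
--
--     for i, part in enumerate(parts):
--         if part and part[0].isupper():
--             if i == 0:
--                 return ""
--             return ".".join(parts[:i])
--
--     return class_full_name
-- ===== SOURCE B (Python) =====
-- def _lead(parts):
--     """Leading segments before the first capitalized one (takewhile)."""
--     if not parts or (parts[0] and parts[0][0].isupper()):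
--         return []
--     return [parts[0]] + _lead(parts[1:])
--
--
-- def _extract_package_namespace(class_full_name: str) -> str:
--     """Extract package namespace from a full class name."""
--     if not class_full_name or "." not in class_full_name:
--         return ""
--     return ".".join(_lead(class_full_name.split(".")))
-- ===== Notes on version B (the rewrite author's own statement) =====
-- stated objective: simpler
-- what changed: A's indexed loop with three return paths (empty prefix, joined slice, or the whole string) is replaced by a pure takewhile-style recursion over the parts plus a single dot-join, which subsumes all three cases because joining all parts reproduces the original string.
import Mathlib
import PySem

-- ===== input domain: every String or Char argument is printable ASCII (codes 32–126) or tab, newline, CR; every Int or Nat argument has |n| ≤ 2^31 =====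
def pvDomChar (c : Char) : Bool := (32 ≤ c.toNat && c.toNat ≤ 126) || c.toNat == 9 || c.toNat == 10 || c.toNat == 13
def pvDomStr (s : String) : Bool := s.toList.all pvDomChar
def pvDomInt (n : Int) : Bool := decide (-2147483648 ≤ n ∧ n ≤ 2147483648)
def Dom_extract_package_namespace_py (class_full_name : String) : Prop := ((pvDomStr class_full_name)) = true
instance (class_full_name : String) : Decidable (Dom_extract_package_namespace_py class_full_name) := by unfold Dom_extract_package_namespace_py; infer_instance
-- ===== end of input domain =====

-- B replaces A's indexed loop with three return paths by a takewhile recursion and a single join ('simpler').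

-- `part and part[0].isupper()` (shared by both Pythons verbatim)
def pvStartsUpper : List Char → Bool
  | [] => false
  | c :: _ => PySem.Chars.isupper c

-- ===== PORT A =====
-- the `for i, part in enumerate(parts)` loop: carries the full parts list and the index i;
-- `some r` = an early `return` with value r, `none` = the loop fell through
def pvLoopA (parts0 : List (List Char)) : List (List Char) → Nat → Option (List Char)
  | [], _ => none
  | p :: rest, i =>
    if pvStartsUpper p then
      if i = 0 then some []
      else some (PySem.Chars.join ['.'] (parts0.take i))
    else pvLoopA parts0 rest (i + 1)

def extract_package_namespace_py (class_full_name : String) : String :=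
  if class_full_name = "" ∨ PySem.Str.isIn "." class_full_name = false then ""
  else
    match pvLoopA (PySem.Chars.splitOn class_full_name.toList ['.'])
        (PySem.Chars.splitOn class_full_name.toList ['.']) 0 with
    | some r => String.ofList r
    | none => class_full_name

-- ===== PORT B =====
-- _lead: the leading segments before the first capitalized one (takewhile recursion)
def pvLead : List (List Char) → List (List Char)
  | [] => []
  | p :: rest => if pvStartsUpper p then [] else p :: pvLead rest

def extract_package_namespace_py_alt (class_full_name : String) : String :=
  if class_full_name = "" ∨ PySem.Str.isIn "." class_full_name = false then ""
  else
    String.ofList (PySem.Chars.join ['.'] (pvLead (PySem.Chars.splitOn class_full_name.toList ['.'])))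

-- ===== PRECONDITION & SPEC =====
def Spec_extract_package_namespace_py (class_full_name : String) (out : String) : Prop := out = extract_package_namespace_py_alt class_full_name
instance (class_full_name : String) (out : String) : Decidable (Spec_extract_package_namespace_py class_full_name out) := by unfold Spec_extract_package_namespace_py; infer_instance

-- ===== CLAIM (what is proved, stated in full; the proofs are below) =====
def Claim_equal_extract_package_namespace_py : Prop := ∀ (class_full_name : String), Dom_extract_package_namespace_py class_full_name → Spec_extract_package_namespace_py class_full_name (extract_package_namespace_py class_full_name)

-- ===== LEMMAS AND PROOFS =====

-- PySem's fuel-based single-char splitOn agrees with Mathlib's List.splitOn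
theorem pvGo_single (c : Char) : ∀ (fuel : Nat) (l cur : List Char) (acc : List (List Char)) (_ : l.length < fuel),
    PySem.Chars.splitOn.go [c] fuel l cur acc
      = acc.reverse ++ List.modifyHead (cur.reverse ++ ·) (List.splitOn c l) := by
  intro fuel
  induction fuel with
  | zero => intro l cur acc h; omega
  | succ fuel ih =>
    intro l cur acc h
    cases l with
    | nil =>
      simp [PySem.Chars.splitOn.go, List.splitOn_nil]
    | cons ch rest =>
      rw [PySem.Chars.splitOn.go]
      by_cases hc : c = ch
      · subst hc
        have hpre : [c].isPrefixOf (c :: rest) = true := by simp [List.isPrefixOf]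
        rw [if_pos hpre]
        simp only [List.length_cons] at h
        rw [ih _ _ _ (by simpa using Nat.lt_of_succ_lt_succ h)]
        obtain ⟨h0, t0, hsplit⟩ := List.exists_cons_of_ne_nil (List.splitOnP_ne_nil (fun x => x == c) rest)
        simp [List.splitOn, List.splitOnP_cons, hsplit]
      · have hpre : [c].isPrefixOf (ch :: rest) = false := by
          simp [List.isPrefixOf, hc]
        rw [if_neg (by simp [hpre])]
        simp only [List.length_cons] at h
        rw [ih _ _ _ (Nat.lt_of_succ_lt_succ h)]
        obtain ⟨h0, t0, hsplit⟩ := List.exists_cons_of_ne_nil (List.splitOnP_ne_nil (fun x => x == c) rest)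
        have hne : (ch == c) = false := by simp [Ne.symm hc]
        simp [List.splitOn, List.splitOnP_cons, hsplit, hne]

theorem pvSplitOn_single (c : Char) (l : List Char) :
    PySem.Chars.splitOn l [c] = List.splitOn c l := by
  rw [PySem.Chars.splitOn, pvGo_single c (l.length + 1) l [] [] (by omega)]
  obtain ⟨h0, t0, hsplit⟩ := List.exists_cons_of_ne_nil (List.splitOnP_ne_nil (fun x => x == c) l)
  simp [List.splitOn] at hsplit ⊢
  simp [hsplit]

theorem pvJoin_splitOn (c : Char) (l : List Char) :
    PySem.Chars.join [c] (PySem.Chars.splitOn l [c]) = l := by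
  rw [pvSplitOn_single]
  exact List.intercalate_splitOn l c

-- A's loop versus B's takewhile, generalized over the loop position
theorem pvLoop_vs_lead (parts0 : List (List Char)) : ∀ (suf : List (List Char)) (i : Nat),
    parts0.drop i = suf →
    (match pvLoopA parts0 suf i with
      | some r => r
      | none => PySem.Chars.join ['.'] parts0)
      = PySem.Chars.join ['.'] (parts0.take i ++ pvLead suf) := by
  intro suf
  induction suf with
  | nil =>
    intro i hdrop
    have hlen : parts0.length ≤ i := by
      by_contra hlt
      exact absurd hdrop (by simp [List.drop_eq_nil_iff]; omega)
    simp [pvLoopA, pvLead, List.take_of_length_le hlen]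
  | cons p rest ih =>
    intro i hdrop
    have hget : parts0[i]? = some p := by
      have h := congrArg (fun l => l[0]?) hdrop
      simp only [List.getElem?_drop] at h
      simpa using h
    have htake : parts0.take (i + 1) = parts0.take i ++ [p] := by
      rw [List.take_add_one, hget]; rfl
    rw [pvLoopA]
    by_cases hc : pvStartsUpper p
    · rw [if_pos hc]
      by_cases hi : i = 0
      · subst hi
        simp [pvLead, hc, PySem.Chars.join, List.intercalate]
      · rw [if_neg hi]
        simp [pvLead, hc]
    · rw [if_neg hc]
      have hdrop' : parts0.drop (i + 1) = rest := by
        have h := congrArg (List.drop 1) hdrop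
        simpa [List.drop_drop] using h
      rw [ih (i + 1) hdrop']
      simp [pvLead, hc, htake]

-- ===== VERDICT (by name: the statement is the Claim_ definition above) =====
theorem extract_package_namespace_py_spec : Claim_equal_extract_package_namespace_py := by
  intro s _
  unfold Spec_extract_package_namespace_py extract_package_namespace_py extract_package_namespace_py_alt
  by_cases hg : s = "" ∨ PySem.Str.isIn "." s = false
  · rw [if_pos hg, if_pos hg]
  · rw [if_neg hg, if_neg hg]
    have hmain := pvLoop_vs_lead (PySem.Chars.splitOn s.toList ['.'])
      (PySem.Chars.splitOn s.toList ['.']) 0 (by simp)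
    simp only [List.take_zero, List.nil_append] at hmain
    cases hloop : pvLoopA (PySem.Chars.splitOn s.toList ['.']) (PySem.Chars.splitOn s.toList ['.']) 0 with
    | some r =>
      rw [hloop] at hmain
      simp only at hmain
      show String.ofList r = _
      rw [hmain]
    | none =>
      rw [hloop] at hmain
      simp only at hmain
      show s = _
      rw [← hmain, pvJoin_splitOn]
      simp
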